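-- pv_equiv track=rewrite | github.com/nzaki02/Student-Advising | helper.py | dynamically_balance_courses
-- ===== SOURCE A (Python) =====
-- def dynamically_balance_courses(courses):
--
--     # Split courses into high, medium, and low priority (roughly equal thirds)
--     third = len(courses) // 3
--     high_priority = courses[:third]
--     medium_priority = courses[third:2 * third]
--     low_priority = courses[2 * third:]
--
--     # Initialize list to hold the final balanced distribution
--     balanced_courses = []
--
--     # Proportions for high, medium, and low priority courses in a group
--     high_count = 3
--     medium_count = 2
--     low_count = 1
--
--     # Distribute courses into balanced groups
--     while high_priority or medium_priority or low_priority: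
--         group = []
--
--         # Add high-priority courses
--         for _ in range(high_count):
--             if high_priority:
--                 group.append(high_priority.pop(0))
--
--         # Add medium-priority courses
--         for _ in range(medium_count):
--             if medium_priority:
--                 group.append(medium_priority.pop(0))
--
--         # Add low-priority courses
--         for _ in range(low_count):
--             if low_priority:
--                 group.append(low_priority.pop(0))
--
--         # Add the group to the balanced courses list
--         balanced_courses.extend(group)
--
--
--     return balanced_courses
-- ===== SOURCE B (Python) =====
-- def dynamically_balance_courses(courses):
--     # Same 3:2:1 interleaving, but computed with a round counter and slices
--     # instead of three mutable sublists drained with pop(0); no mutation.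
--     third = len(courses) // 3
--     high = courses[:third]
--     medium = courses[third:2 * third]
--     low = courses[2 * third:]
--     result = []
--     r = 0
--     while 3 * r < len(high) or 2 * r < len(medium) or r < len(low):
--         result += high[3 * r:3 * r + 3] + medium[2 * r:2 * r + 2] + low[r:r + 1]
--         r += 1
--     return result
-- ===== Notes on version B (the rewrite author's own statement) =====
-- stated objective: faster
-- what changed: Replaces the three mutable priority sublists drained with pop(0) per group by a round counter r that reads the same 3/2/1-sized chunks directly as slices of the immutable thirds, appending high[3r:3r+3]+medium[2r:2r+2]+low[r:r+1] each round.
import Mathlib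
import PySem

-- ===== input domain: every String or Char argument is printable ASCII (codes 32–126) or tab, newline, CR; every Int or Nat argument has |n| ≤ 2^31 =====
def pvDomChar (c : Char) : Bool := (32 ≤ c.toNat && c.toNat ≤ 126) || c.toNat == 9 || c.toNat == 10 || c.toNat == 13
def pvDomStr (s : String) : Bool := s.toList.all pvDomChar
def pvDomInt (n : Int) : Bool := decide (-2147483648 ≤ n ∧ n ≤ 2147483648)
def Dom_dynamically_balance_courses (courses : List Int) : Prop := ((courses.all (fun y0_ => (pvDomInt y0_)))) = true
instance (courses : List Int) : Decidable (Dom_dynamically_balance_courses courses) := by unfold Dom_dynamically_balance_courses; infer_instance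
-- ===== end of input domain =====

-- B replaces A's three mutable sublists drained with pop(0) by a round counter
-- reading the same 3/2/1 chunks as slices of immutable thirds (objective: simpler).

-- ===== PORT A =====
-- A's while loop. Each iteration: 'for _ in range(k): if lst: group.append(lst.pop(0))'
-- moves exactly the first min(k, len) elements, i.e. take k, leaving drop k.
-- The fuel argument (length of the input + 1) is only a totality guard: the loop
-- removes at least one element per iteration, so the fuel is never exhausted.
def pvALoop (fuel : Nat) (h m l : List Int) : List Int :=
  match fuel with
  | 0 => []
  | fuel + 1 =>
    if h = [] ∧ m = [] ∧ l = [] then []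
    else ((h.take 3 ++ m.take 2) ++ l.take 1) ++ pvALoop fuel (h.drop 3) (m.drop 2) (l.drop 1)

def dynamically_balance_courses (courses : List Int) : List Int :=
  let third : Int := PySem.Int.floordiv (courses.length : Int) 3
  pvALoop (courses.length + 1)
          (PySem.List.slice courses none (some third))
          (PySem.List.slice courses (some third) (some (2 * third)))
          (PySem.List.slice courses (some (2 * third)) none)

-- ===== PORT B =====
-- B's while loop: round counter r over the fixed thirds (same fuel totality guard).
def pvBRounds (fuel : Nat) (h m l : List Int) (r : Nat) : List Int :=
  match fuel with
  | 0 => []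
  | fuel + 1 =>
    if 3 * r < h.length ∨ 2 * r < m.length ∨ r < l.length then
      ((PySem.List.slice h (some ((3 * r : Nat) : Int)) (some ((3 * r + 3 : Nat) : Int)) ++
        PySem.List.slice m (some ((2 * r : Nat) : Int)) (some ((2 * r + 2 : Nat) : Int))) ++
        PySem.List.slice l (some ((r : Nat) : Int)) (some ((r + 1 : Nat) : Int))) ++
      pvBRounds fuel h m l (r + 1)
    else []

def dynamically_balance_courses_alt (courses : List Int) : List Int :=
  let third : Int := PySem.Int.floordiv (courses.length : Int) 3
  pvBRounds (courses.length + 1)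
            (PySem.List.slice courses none (some third))
            (PySem.List.slice courses (some third) (some (2 * third)))
            (PySem.List.slice courses (some (2 * third)) none) 0

-- ===== PRECONDITION & SPEC =====
def Spec_dynamically_balance_courses (courses : List Int) (out : List Int) : Prop := out = dynamically_balance_courses_alt courses
instance (courses : List Int) (out : List Int) : Decidable (Spec_dynamically_balance_courses courses out) := by unfold Spec_dynamically_balance_courses; infer_instance

-- ===== CLAIM (what is proved, stated in full; the proofs are below) =====
def Claim_equal_dynamically_balance_courses : Prop := ∀ (courses : List Int), Dom_dynamically_balance_courses courses → Spec_dynamically_balance_courses courses (dynamically_balance_courses courses)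

-- ===== LEMMAS AND PROOFS =====

-- With enough fuel, round r of B reads exactly the state A's loop holds after r iterations.
lemma pvBRounds_eq_pvALoop (fuel : Nat) (h m l : List Int) (r : Nat)
    (hf : (h.length - 3 * r) + (m.length - 2 * r) + (l.length - r) < fuel) :
    pvBRounds fuel h m l r = pvALoop fuel (h.drop (3 * r)) (m.drop (2 * r)) (l.drop r) := by
  induction fuel generalizing r with
  | zero => omega
  | succ fuel ih =>
    by_cases hg : 3 * r < h.length ∨ 2 * r < m.length ∨ r < l.length
    · rw [pvBRounds, if_pos hg, pvALoop, if_neg, ih (r + 1) (by omega)]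
      · have e1 : PySem.List.slice h (some ((3 * r : Nat) : Int)) (some ((3 * r + 3 : Nat) : Int))
            = (h.drop (3 * r)).take 3 := by
          rw [PySem.List.slice_natCast]; congr 1; omega
        have e2 : PySem.List.slice m (some ((2 * r : Nat) : Int)) (some ((2 * r + 2 : Nat) : Int))
            = (m.drop (2 * r)).take 2 := by
          rw [PySem.List.slice_natCast]; congr 1; omega
        have e3 : PySem.List.slice l (some ((r : Nat) : Int)) (some ((r + 1 : Nat) : Int))
            = (l.drop r).take 1 := by
          rw [PySem.List.slice_natCast]; congr 1; omega
        rw [e1, e2, e3, List.drop_drop, List.drop_drop, List.drop_drop]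
        congr 2
      · simp only [List.drop_eq_nil_iff, not_and_or, not_le]
        rcases hg with hx | hx | hx
        · exact Or.inl (by omega)
        · exact Or.inr (Or.inl (by omega))
        · exact Or.inr (Or.inr (by omega))
    · rw [pvBRounds, if_neg hg, pvALoop, if_pos]
      push Not at hg
      refine ⟨?_, ?_, ?_⟩ <;> simp only [List.drop_eq_nil_iff] <;> omega

-- ===== VERDICT (by name: the statement is the Claim_ definition above) =====
theorem dynamically_balance_courses_spec : Claim_equal_dynamically_balance_courses := by
  intro courses _
  unfold Spec_dynamically_balance_courses dynamically_balance_courses dynamically_balance_courses_alt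
  have ht : PySem.Int.floordiv (courses.length : Int) 3 = ((courses.length / 3 : Nat) : Int) := by
    exact_mod_cast PySem.Int.floordiv_natCast courses.length 3
  have h2 : (2 : Int) * ((courses.length / 3 : Nat) : Int) = ((2 * (courses.length / 3) : Nat) : Int) := by
    push_cast; ring
  simp only [ht, h2, PySem.List.slice_to_natCast, PySem.List.slice_natCast,
    PySem.List.slice_from_natCast]
  rw [pvBRounds_eq_pvALoop]
  · simp
  · simp only [List.length_take, List.length_drop]
    omega
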